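-- pv_equiv track=rewrite | github.com/pypi-data/pypi-mirror-399 | packages/tokenizerz/tokenizerz-0.0.3.tar.gz/tokenizerz-0.0.3/tokenizerz.py | pad_token_sequences
-- ===== SOURCE A (Python) =====
-- def pad_token_sequences(sequences, pad_token_id, pad_position_id):
--     max_len = max(len(seq) for seq in sequences)
--     input_ids = []
--     position_ids = []
--     padding_mask = []
--     for seq in sequences:
--         pad_len = max_len - len(seq)
--         padded = [pad_token_id] * pad_len + seq
--         input_ids.append(padded)
--         pos_ids = [pad_position_id] * pad_len + list(range(len(seq)))
--         position_ids.append(pos_ids)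
--         mask = [False] * pad_len + [True] * len(seq)
--         padding_mask.append(mask)
--     return input_ids, position_ids, padding_mask
-- ===== SOURCE B (Python) =====
-- def pad_token_sequences(sequences, pad_token_id, pad_position_id):
--     max_len = max(len(seq) for seq in sequences)
--     pads = [max_len - len(seq) for seq in sequences]
--     input_ids = [[pad_token_id if i < p else seq[i - p] for i in range(max_len)]
--                  for seq, p in zip(sequences, pads)]
--     position_ids = [[pad_position_id if i < p else i - p for i in range(max_len)]
--                     for p in pads]
--     padding_mask = [[i >= p for i in range(max_len)] for p in pads]
--     return input_ids, position_ids, padding_mask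
-- ===== Notes on version B (the rewrite author's own statement) =====
-- stated objective: alternative
-- what changed: Replaces A's single loop that concatenates a padding block with a suffix for each of the three rows by three separate comprehension passes that build each row as one width-max_len map deciding per index via pad-length arithmetic (pad_token_id if i<p else seq[i-p], etc.).
import Mathlib
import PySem

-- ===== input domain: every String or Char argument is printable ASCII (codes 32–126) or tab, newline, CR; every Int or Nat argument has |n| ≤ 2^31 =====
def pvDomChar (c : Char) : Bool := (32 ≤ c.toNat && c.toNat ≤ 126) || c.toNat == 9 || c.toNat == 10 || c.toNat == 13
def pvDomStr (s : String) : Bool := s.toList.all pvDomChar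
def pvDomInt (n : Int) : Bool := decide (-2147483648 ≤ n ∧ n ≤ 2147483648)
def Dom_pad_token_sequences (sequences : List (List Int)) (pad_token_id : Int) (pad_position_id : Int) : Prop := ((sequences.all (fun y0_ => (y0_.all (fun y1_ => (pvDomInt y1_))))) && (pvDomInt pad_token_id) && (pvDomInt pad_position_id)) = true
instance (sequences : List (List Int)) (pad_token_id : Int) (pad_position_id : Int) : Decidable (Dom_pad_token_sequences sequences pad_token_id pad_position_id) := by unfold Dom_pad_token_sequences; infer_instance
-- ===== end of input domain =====

-- B rebuilds each output row as one width-max_len per-index map (pad-length arithmetic) in three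
-- separate passes, instead of A's single loop concatenating a padding block with a suffix; objective: alternative.


-- ===== PORT A =====
-- max(len(seq) for seq in sequences); on a nonempty list (guaranteed by Pre_) this fold from 0
-- equals Python's max of the (nonnegative) lengths.
def pvMaxLen (sequences : List (List Int)) : Nat :=
  sequences.foldl (fun m s => max m s.length) 0

def pad_token_sequences (sequences : List (List Int)) (pad_token_id : Int) (pad_position_id : Int) : List (List Int) × List (List Int) × List (List Bool) :=
  let max_len := pvMaxLen sequences
  sequences.foldl
    (fun (st : List (List Int) × List (List Int) × List (List Bool)) seq =>
      let pad_len := max_len - seq.length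
      let padded := List.replicate pad_len pad_token_id ++ seq
      let pos_ids := List.replicate pad_len pad_position_id ++ (List.range seq.length).map (fun j => Int.ofNat j)
      let mask := List.replicate pad_len false ++ List.replicate seq.length true
      (st.1 ++ [padded], st.2.1 ++ [pos_ids], st.2.2 ++ [mask]))
    ([], [], [])

-- ===== PORT B =====
-- seq[i - p] is always in range (p = max_len - len seq, p ≤ i < max_len), ported as getD with default 0
def pad_token_sequences_alt (sequences : List (List Int)) (pad_token_id : Int) (pad_position_id : Int) : List (List Int) × List (List Int) × List (List Bool) :=
  let max_len := pvMaxLen sequences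
  let pads := sequences.map (fun seq => max_len - seq.length)
  let input_ids := (sequences.zip pads).map (fun sp =>
    (List.range max_len).map (fun i => if i < sp.2 then pad_token_id else sp.1.getD (i - sp.2) 0))
  let position_ids := pads.map (fun p =>
    (List.range max_len).map (fun i => if i < p then pad_position_id else ((i - p : Nat) : Int)))
  let padding_mask := pads.map (fun p =>
    (List.range max_len).map (fun i => decide (p ≤ i)))
  (input_ids, position_ids, padding_mask)

-- ===== PRECONDITION & SPEC =====
-- Pre_ excludes only the empty list of sequences, on which Python A raises ValueError (max of empty).
def Pre_pad_token_sequences (sequences : List (List Int)) (_pad_token_id : Int) (_pad_position_id : Int) : Prop := sequences ≠ []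
instance (sequences : List (List Int)) (pad_token_id : Int) (pad_position_id : Int) : Decidable (Pre_pad_token_sequences sequences pad_token_id pad_position_id) := by unfold Pre_pad_token_sequences; infer_instance
def pvWitness_pad_token_sequences : List (List Int) × Int × Int := ([[1, 2], [3]], 9, -1)

def Spec_pad_token_sequences (sequences : List (List Int)) (pad_token_id : Int) (pad_position_id : Int) (out : List (List Int) × List (List Int) × List (List Bool)) : Prop := out = pad_token_sequences_alt sequences pad_token_id pad_position_id
instance (sequences : List (List Int)) (pad_token_id : Int) (pad_position_id : Int) (out : List (List Int) × List (List Int) × List (List Bool)) : Decidable (Spec_pad_token_sequences sequences pad_token_id pad_position_id out) := by unfold Spec_pad_token_sequences; infer_instance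

-- ===== CLAIM (what is proved, stated in full; the proofs are below) =====
def Claim_equal_pad_token_sequences : Prop := ∀ (sequences : List (List Int)) (pad_token_id : Int) (pad_position_id : Int), Dom_pad_token_sequences sequences pad_token_id pad_position_id → Pre_pad_token_sequences sequences pad_token_id pad_position_id → Spec_pad_token_sequences sequences pad_token_id pad_position_id (pad_token_sequences sequences pad_token_id pad_position_id)

-- ===== LEMMAS AND PROOFS =====

theorem pvFoldMax_ge (t : List (List Int)) : ∀ m : Nat, m ≤ t.foldl (fun m s => max m s.length) m := by
  induction t with
  | nil => simp
  | cons b u ih =>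
    intro m
    simp only [List.foldl_cons]
    exact le_trans (le_max_left m b.length) (ih _)

-- every sequence's length is bounded by pvMaxLen
theorem pvLen_le_maxLen (sequences : List (List Int)) (seq : List Int) (h : seq ∈ sequences) :
    seq.length ≤ pvMaxLen sequences := by
  unfold pvMaxLen
  suffices H : ∀ m : Nat, seq.length ≤ sequences.foldl (fun m s => max m s.length) m from H 0
  induction sequences with
  | nil => cases h
  | cons a t ih =>
    intro m
    simp only [List.foldl_cons]
    rcases List.mem_cons.mp h with rfl | h'
    · exact le_trans (le_max_right m seq.length) (pvFoldMax_ge t _)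
    · exact ih h' _

-- row lemmas: block-concatenation = per-index map over range maxlen, when len ≤ maxlen
theorem pvPrefix_const {α : Type} (p : Nat) (f : Nat → α) (x : α) (hf : ∀ i < p, f i = x) :
    (List.range p).map f = List.replicate p x := by
  rw [List.map_congr_left (g := fun _ => x) (fun i hi => hf i (List.mem_range.mp hi))]
  simp [List.map_const']

theorem pvSuffix_shift {α : Type} (p L : Nat) (f : Nat → α) (g : Nat → α)
    (hf : ∀ j < L, f (p + j) = g j) :
    ((List.range L).map (fun j => p + j)).map f = (List.range L).map g := by
  rw [List.map_map]
  exact List.map_congr_left (fun j hj => hf j (List.mem_range.mp hj))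

theorem pvGetD_range (seq : List Int) :
    (List.range seq.length).map (fun j => seq.getD j 0) = seq := by
  apply List.ext_getElem
  · simp
  · intro i h1 h2
    simp [List.getD_eq_getElem?_getD, List.getElem?_eq_getElem h2]

theorem pvRow_ids (maxlen : Nat) (seq : List Int) (x : Int) (h : seq.length ≤ maxlen) :
    List.replicate (maxlen - seq.length) x ++ seq
      = (List.range maxlen).map (fun i => if i < maxlen - seq.length then x else seq.getD (i - (maxlen - seq.length)) 0) := by
  set p := maxlen - seq.length with hp
  have hm : maxlen = p + seq.length := by omega
  rw [hm, List.range_add, List.map_append]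
  rw [pvPrefix_const p _ x (by intro i hi; simp [hi])]
  rw [pvSuffix_shift p seq.length _ (fun j => seq.getD j 0) (by intro j hj; simp), pvGetD_range]

theorem pvRow_pos (maxlen : Nat) (L : Nat) (x : Int) (h : L ≤ maxlen) :
    List.replicate (maxlen - L) x ++ (List.range L).map (fun j => Int.ofNat j)
      = (List.range maxlen).map (fun i => if i < maxlen - L then x else ((i - (maxlen - L) : Nat) : Int)) := by
  set p := maxlen - L with hp
  have hm : maxlen = p + L := by omega
  rw [hm, List.range_add, List.map_append]
  rw [pvPrefix_const p _ x (by intro i hi; simp [hi])]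
  rw [pvSuffix_shift p L _ (fun j => Int.ofNat j) (by intro j hj; simp)]

theorem pvRow_mask (maxlen : Nat) (L : Nat) (h : L ≤ maxlen) :
    List.replicate (maxlen - L) false ++ List.replicate L true
      = (List.range maxlen).map (fun i => decide ((maxlen - L) ≤ i)) := by
  set p := maxlen - L with hp
  have hm : maxlen = p + L := by omega
  rw [hm, List.range_add, List.map_append]
  rw [pvPrefix_const p _ false (by intro i hi; simp; omega)]
  rw [pvSuffix_shift p L _ (fun _ => true) (by intro j hj; simp)]
  simp [List.map_const']

-- A's append-accumulating fold equals three maps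
theorem pvFold_eq_maps (l : List (List Int)) (f1 : List Int → List Int) (f2 : List Int → List Int) (f3 : List Int → List Bool)
    (acc : List (List Int) × List (List Int) × List (List Bool)) :
    l.foldl (fun st seq => (st.1 ++ [f1 seq], st.2.1 ++ [f2 seq], st.2.2 ++ [f3 seq])) acc
      = (acc.1 ++ l.map f1, acc.2.1 ++ l.map f2, acc.2.2 ++ l.map f3) := by
  induction l generalizing acc with
  | nil => simp
  | cons a t ih => simp [ih]

theorem pvZipMap {α β γ : Type} (l : List α) (g : α → β) (h : α × β → γ) :
    ((l.zip (l.map g)).map h) = l.map (fun s => h (s, g s)) := by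
  induction l with
  | nil => rfl
  | cons a t ih => simp [ih]

theorem pad_spec_aux (sequences : List (List Int)) (pad_token_id : Int) (pad_position_id : Int) :
    pad_token_sequences sequences pad_token_id pad_position_id
      = pad_token_sequences_alt sequences pad_token_id pad_position_id := by
  unfold pad_token_sequences pad_token_sequences_alt
  simp only [pvFold_eq_maps, List.nil_append, pvZipMap, List.map_map]
  refine Prod.ext ?_ (Prod.ext ?_ ?_)
  · exact List.map_congr_left (fun seq hs =>
      pvRow_ids (pvMaxLen sequences) seq pad_token_id (pvLen_le_maxLen sequences seq hs))
  · exact List.map_congr_left (fun seq hs =>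
      pvRow_pos (pvMaxLen sequences) seq.length pad_position_id (pvLen_le_maxLen sequences seq hs))
  · exact List.map_congr_left (fun seq hs =>
      pvRow_mask (pvMaxLen sequences) seq.length (pvLen_le_maxLen sequences seq hs))

-- ===== VERDICT (by name: the statement is the Claim_ definition above) =====
theorem pad_token_sequences_spec : Claim_equal_pad_token_sequences := by
  intro sequences pad_token_id pad_position_id _ _
  exact pad_spec_aux sequences pad_token_id pad_position_id
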